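-- pv_equiv track=rewrite | github.com/House-Stats/web-api | web/app/api/search_area_funcs.py | sort_results
-- ===== SOURCE A (Python) =====
-- def sort_results(results):
--     SORT_ORDER = {"area": 0, "outcode": 1, "sector": 2, "postcode": 3, "town": 4, "county": 5, "district": 6, "street": 7}
--     return_list = []
--     for area in results:
--         if area[1] not in ["postcode","outcode","sector","area"]:
--             return_list.append((area[0].title(), area[1].title()))
--         else:
--             return_list.append((area[0], area[1].title()))
--     return_list.sort(key=lambda val: SORT_ORDER[val[1].lower()])
--     return return_list
-- ===== SOURCE B (Python) =====
-- def sort_results(results):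
--     buckets = {"area": [], "outcode": [], "sector": [], "postcode": [], "town": [], "county": [], "district": [], "street": []}
--     for area in results:
--         if area[1] not in ["postcode", "outcode", "sector", "area"]:
--             item = (area[0].title(), area[1].title())
--         else:
--             item = (area[0], area[1].title())
--         buckets[item[1].lower()].append(item)
--     out = []
--     for bucket in buckets.values():
--         out.extend(bucket)
--     return out
-- ===== Notes on version B (the rewrite author's own statement) =====
-- stated objective: alternative
-- what changed: Replaces the comparison sort keyed by a priority dict with a single-pass bucket distribution: items are appended in order to one of eight pre-created category buckets and the buckets are concatenated in priority order (stability for free).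
import Mathlib
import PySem

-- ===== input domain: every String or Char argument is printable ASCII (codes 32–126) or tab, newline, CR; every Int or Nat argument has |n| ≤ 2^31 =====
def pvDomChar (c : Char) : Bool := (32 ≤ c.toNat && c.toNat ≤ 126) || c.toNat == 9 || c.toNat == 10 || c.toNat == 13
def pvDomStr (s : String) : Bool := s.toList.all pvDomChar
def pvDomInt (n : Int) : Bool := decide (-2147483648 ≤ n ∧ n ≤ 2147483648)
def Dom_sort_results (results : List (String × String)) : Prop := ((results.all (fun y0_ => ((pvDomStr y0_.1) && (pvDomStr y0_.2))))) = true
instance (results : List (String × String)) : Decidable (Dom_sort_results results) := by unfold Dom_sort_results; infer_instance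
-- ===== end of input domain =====

-- B replaces A's keyed comparison sort with a one-pass bucket distribution over the eight
-- fixed categories (a genuinely different algorithm of similar measured cost).

-- exact port of Python str.title() on the ASCII domain (cased characters = A-Z/a-z)
def pvTitleAux : List Char → Bool → List Char
  | [], _ => []
  | c :: rest, prev =>
    (if PySem.Chars.isalpha c then
       (if prev then PySem.Chars.lowerChar c else PySem.Chars.upperChar c)
     else c) :: pvTitleAux rest (PySem.Chars.isalpha c)

def pvTitle (s : String) : String := String.ofList (pvTitleAux s.toList false)

-- the per-element transformation both Pythons perform inside their loop
def pvTrans (a : String × String) : String × String :=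
  if a.2 ∉ ["postcode", "outcode", "sector", "area"] then (pvTitle a.1, pvTitle a.2)
  else (a.1, pvTitle a.2)

def pvSortOrder : PySem.Dict String Int :=
  PySem.Dict.ofList [("area", 0), ("outcode", 1), ("sector", 2), ("postcode", 3),
                     ("town", 4), ("county", 5), ("district", 6), ("street", 7)]

-- SORT_ORDER[val[1].lower()]; total form — Pre_ confines inputs to keys present in the dict
def pvKey (val : String × String) : Int := PySem.Dict.getD pvSortOrder (PySem.Str.lower val.2) 0

-- ===== PORT A =====
def sort_results (results : List (String × String)) : List (String × String) :=
  let return_list := results.foldl (fun acc area => acc ++ [pvTrans area]) []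
  PySem.List.sorted return_list pvKey

-- ===== PORT B =====
def pvCats : List String := ["area", "outcode", "sector", "postcode", "town", "county", "district", "street"]

-- Python B's dict literal of eight empty buckets
def pvBuckets0 : PySem.Dict String (List (String × String)) :=
  PySem.Dict.ofList [("area", []), ("outcode", []), ("sector", []), ("postcode", []),
                     ("town", []), ("county", []), ("district", []), ("street", [])]

def sort_results_alt (results : List (String × String)) : List (String × String) :=
  let buckets := results.foldl (fun d area =>
    d.modify (PySem.Str.lower (pvTrans area).2) [] (fun b => b ++ [pvTrans area])) pvBuckets0
  buckets.values.foldl (fun out b => out ++ b) []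

-- ===== PRECONDITION & SPEC =====
-- Pre_ excludes exactly the inputs on which both Pythons raise KeyError: a pair whose
-- lowercased category is not one of the eight known categories.
def Pre_sort_results (results : List (String × String)) : Prop :=
  ∀ p ∈ results, PySem.Str.lower p.2 ∈ pvCats
instance (results : List (String × String)) : Decidable (Pre_sort_results results) := by
  unfold Pre_sort_results; infer_instance

def pvWitness_sort_results : (List (String × String)) :=
  [("10 downing st", "street"), ("london", "Town"), ("sw1a", "postcode"), ("sw1", "outcode")]

def Spec_sort_results (results : List (String × String)) (out : List (String × String)) : Prop :=
  out = sort_results_alt results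
instance (results : List (String × String)) (out : List (String × String)) :
    Decidable (Spec_sort_results results out) := by unfold Spec_sort_results; infer_instance

-- ===== CLAIM =====
def Claim_equal_sort_results : Prop :=
  ∀ (results : List (String × String)), Dom_sort_results results → Pre_sort_results results →
    Spec_sort_results results (sort_results results)

-- ===== LEMMAS AND PROOFS =====

theorem pv_char_eq_of_toNat {a b : Char} (h : a.toNat = b.toNat) : a = b := by
  have := congrArg Char.ofNat h
  rwa [Char.ofNat_toNat, Char.ofNat_toNat] at this

theorem pv_islower_iff (c : Char) : PySem.Chars.islower c = true ↔ 97 ≤ c.toNat ∧ c.toNat ≤ 122 := by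
  simp only [PySem.Chars.islower, Bool.and_eq_true, decide_eq_true_eq, Char.le_def,
    UInt32.le_iff_toNat_le]
  rfl

theorem pv_isupper_iff (c : Char) : PySem.Chars.isupper c = true ↔ 65 ≤ c.toNat ∧ c.toNat ≤ 90 := by
  simp only [PySem.Chars.isupper, Bool.and_eq_true, decide_eq_true_eq, Char.le_def,
    UInt32.le_iff_toNat_le]
  rfl

theorem pv_toNat_ofNat {n : Nat} (h : n < 128) : (Char.ofNat n).toNat = n := by
  rw [Char.toNat_ofNat, if_pos]; exact Or.inl (by omega)

theorem pv_lower_upper (c : Char) :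
    PySem.Chars.lowerChar (PySem.Chars.upperChar c) = PySem.Chars.lowerChar c := by
  unfold PySem.Chars.upperChar PySem.Chars.lowerChar
  by_cases hl : PySem.Chars.islower c = true
  · rw [if_pos hl]
    obtain ⟨a1, a2⟩ := (pv_islower_iff c).1 hl
    have ht : (Char.ofNat (c.toNat - 32)).toNat = c.toNat - 32 := pv_toNat_ofNat (by omega)
    have hu : PySem.Chars.isupper (Char.ofNat (c.toNat - 32)) = true :=
      (pv_isupper_iff _).2 (by omega)
    have hnu : ¬ PySem.Chars.isupper c = true := by
      intro h; obtain ⟨b1, b2⟩ := (pv_isupper_iff c).1 h; omega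
    rw [if_pos hu, if_neg hnu]
    apply pv_char_eq_of_toNat
    rw [pv_toNat_ofNat (by omega), ht]; omega
  · rw [if_neg hl]

theorem pv_lower_lower (c : Char) :
    PySem.Chars.lowerChar (PySem.Chars.lowerChar c) = PySem.Chars.lowerChar c := by
  unfold PySem.Chars.lowerChar
  by_cases hu : PySem.Chars.isupper c = true
  · rw [if_pos hu]
    obtain ⟨a1, a2⟩ := (pv_isupper_iff c).1 hu
    have hnu : ¬ PySem.Chars.isupper (Char.ofNat (c.toNat + 32)) = true := by
      intro h
      obtain ⟨b1, b2⟩ := (pv_isupper_iff _).1 h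
      rw [pv_toNat_ofNat (by omega)] at b1 b2
      omega
    rw [if_neg hnu]
  · rw [if_neg hu, if_neg hu]

theorem pv_lower_titleAux (l : List Char) (b : Bool) :
    PySem.Chars.lower (pvTitleAux l b) = PySem.Chars.lower l := by
  induction l generalizing b with
  | nil => rfl
  | cons c rest ih =>
    simp only [pvTitleAux, PySem.Chars.lower, List.map_cons] at *
    refine congrArg₂ _ ?_ (ih _)
    split_ifs with h1 h2
    · exact pv_lower_lower c
    · exact pv_lower_upper c
    · rfl

theorem pv_lower_title (s : String) : PySem.Str.lower (pvTitle s) = PySem.Str.lower s := by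
  have h1 : (PySem.Str.lower (pvTitle s)).toList = (PySem.Str.lower s).toList := by
    rw [PySem.Str.toList_lower, PySem.Str.toList_lower, pvTitle, String.toList_ofList,
      pv_lower_titleAux]
  have := congrArg String.ofList h1
  rwa [String.ofList_toList, String.ofList_toList] at this

theorem pv_trans_snd (a : String × String) : (pvTrans a).2 = pvTitle a.2 := by
  unfold pvTrans; split_ifs <;> rfl

theorem pv_lower_trans (a : String × String) :
    PySem.Str.lower (pvTrans a).2 = PySem.Str.lower a.2 := by
  rw [pv_trans_snd, pv_lower_title]

-- insertion into a list all of whose elements are strictly greater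
theorem pv_insertBy_front {α : Type} (key : α → Int) (x : α) (l : List α)
    (h : ∀ y ∈ l, key x < key y) :
    PySem.List.insertBy (fun a b => decide (key a < key b)) x l = x :: l := by
  cases l with
  | nil => rfl
  | cons y ys =>
    simp only [PySem.List.insertBy]
    rw [if_pos (decide_eq_true (h y List.mem_cons_self))]

-- insertion passes over a prefix of elements that do not compare greater
theorem pv_insertBy_skip {α : Type} (key : α → Int) (x : α) (as bs : List α)
    (h : ∀ y ∈ as, ¬ key x < key y) :
    PySem.List.insertBy (fun a b => decide (key a < key b)) x (as ++ bs) =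
      as ++ PySem.List.insertBy (fun a b => decide (key a < key b)) x bs := by
  induction as with
  | nil => rfl
  | cons y ys ih =>
    simp only [List.cons_append, PySem.List.insertBy]
    rw [if_neg (by simp only [decide_eq_true_eq]; exact h y List.mem_cons_self),
      ih (fun z hz => h z (List.mem_cons_of_mem _ hz))]

-- stable insertion into a bucketed list: the new element lands at the end of its bucket
theorem pv_insertBy_flatMap {α : Type} (key : α → Int) (x : α) (ks : List Int)
    (g : Int → List α) (hks : ks.Pairwise (· < ·)) (hk0 : key x ∈ ks)
    (hg : ∀ k ∈ ks, ∀ y ∈ g k, key y = k) :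
    PySem.List.insertBy (fun a b => decide (key a < key b)) x (ks.flatMap g) =
      ks.flatMap (fun k => if k = key x then g k ++ [x] else g k) := by
  induction ks with
  | nil => cases hk0
  | cons k rest ih =>
    rw [List.pairwise_cons] at hks
    obtain ⟨hlt, hrest⟩ := hks
    simp only [List.flatMap_cons]
    by_cases hk : k = key x
    · subst hk
      rw [pv_insertBy_skip key x (g (key x)) _ ?_, pv_insertBy_front key x _ ?_]
      · rw [if_pos rfl]
        have hrw : rest.flatMap (fun k' => if k' = key x then g k' ++ [x] else g k') =
            rest.flatMap g := by
          apply List.flatMap_congr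
          intro k' hk'
          rw [if_neg (by have := hlt k' hk'; omega)]
        rw [hrw]
        simp
      · intro y hy
        rw [List.mem_flatMap] at hy
        obtain ⟨k', hk', hy'⟩ := hy
        have := hg k' (List.mem_cons_of_mem _ hk') y hy'
        have := hlt k' hk'
        omega
      · intro y hy
        have := hg (key x) List.mem_cons_self y hy
        omega
    · have hk0' : key x ∈ rest := by
        cases hk0 with
        | head => exact absurd rfl hk
        | tail _ h => exact h
      rw [pv_insertBy_skip key x (g k) _ ?_]
      · rw [ih hrest hk0' (fun k' hk' => hg k' (List.mem_cons_of_mem _ hk')), if_neg hk]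
      · intro y hy
        have h1 := hg k List.mem_cons_self y hy
        have h2 := hlt _ hk0'
        omega

-- a stable sort groups elements by key, in key order, preserving input order
theorem pv_sorted_groups {α : Type} (key : α → Int) (ks : List Int)
    (hks : ks.Pairwise (· < ·)) (xs : List α) (h : ∀ x ∈ xs, key x ∈ ks) :
    PySem.List.sorted xs key =
      ks.flatMap (fun k => xs.filter (fun x => decide (key x = k))) := by
  rw [PySem.List.sorted_eq_foldl_insertBy]
  induction xs using List.reverseRecOn with
  | nil => simp
  | append_singleton l x ih =>
    rw [List.foldl_append, List.foldl_cons, List.foldl_nil,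
      ih (fun y hy => h y (List.mem_append_left _ hy)),
      pv_insertBy_flatMap key x ks _ hks (h x (List.mem_append_right _ List.mem_cons_self))
        (fun k hk y hy => by
          rw [List.mem_filter] at hy
          exact of_decide_eq_true hy.2)]
    apply List.flatMap_congr
    intro k hk
    rw [List.filter_append]
    split_ifs with hkx
    · subst hkx
      simp
    · simp only [List.filter_cons, List.filter_nil]
      rw [if_neg]
      · simp
      · simp only [decide_eq_true_eq]
        intro hc
        exact hkx hc.symm

theorem pv_set_update_of_mem {s : PySem.Set String} {l : List String}
    (h : ∀ x ∈ l, x ∈ s) : PySem.Set.update s l = s := by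
  induction l generalizing s with
  | nil => rfl
  | cons x xs ih =>
    have hadd : PySem.Set.add s x = s := by
      unfold PySem.Set.add
      rw [if_pos]
      exact List.elem_eq_true_of_mem (h x List.mem_cons_self)
    show PySem.Set.update (PySem.Set.add s x) xs = s
    rw [hadd]
    exact ih (fun y hy => h y (List.mem_cons_of_mem _ hy))

theorem pv_b0_getD (k : String) : pvBuckets0.getD k [] = [] := by
  rw [PySem.Dict.getD_eq_get?_getD]
  cases hg : pvBuckets0.get? k with
  | none => rfl
  | some v =>
    have hm := PySem.Dict.mem_items_of_get?_eq_some _ hg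
    have hitems : pvBuckets0.items = [("area", []), ("outcode", []), ("sector", []),
        ("postcode", []), ("town", []), ("county", []), ("district", []), ("street", [])] := by
      decide
    rw [hitems] at hm
    simp only [List.mem_cons, List.not_mem_nil, or_false, Prod.mk.injEq] at hm
    rcases hm with ⟨_, hv⟩ | ⟨_, hv⟩ | ⟨_, hv⟩ | ⟨_, hv⟩ | ⟨_, hv⟩ | ⟨_, hv⟩ | ⟨_, hv⟩ | ⟨_, hv⟩ <;>
      rw [hv] <;> rfl

-- one bucket of B equals the matching key-class of A's sorted list
theorem pv_component (results : List (String × String))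
    (hpre : ∀ p ∈ results, PySem.Str.lower p.2 ∈ pvCats) (c : String) (i : Int)
    (h8 : ∀ s ∈ pvCats, (s == c) = decide (PySem.Dict.getD pvSortOrder s 0 = i)) :
    (results.filter (fun a => PySem.Str.lower (pvTrans a).2 == c)).map pvTrans =
      (results.map pvTrans).filter (fun v => decide (pvKey v = i)) := by
  rw [List.filter_map]
  congr 1
  apply List.filter_congr
  intro a ha
  have hs := hpre a ha
  simp only [Function.comp]
  rw [pv_lower_trans]
  have hkey : pvKey (pvTrans a) = PySem.Dict.getD pvSortOrder (PySem.Str.lower a.2) 0 := by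
    unfold pvKey
    rw [pv_lower_trans]
  rw [hkey]
  exact h8 _ hs

-- ===== VERDICT (by name: the statement is the Claim_ definition above) =====
theorem sort_results_spec : Claim_equal_sort_results := by
  intro results _hdom hpre
  unfold Spec_sort_results
  -- A's side: the build loop is a map, then apply the stable-sort grouping lemma
  have hA : sort_results results =
      ([0, 1, 2, 3, 4, 5, 6, 7] : List Int).flatMap
        (fun k => (results.map pvTrans).filter (fun v => decide (pvKey v = k))) := by
    show PySem.List.sorted (results.foldl (fun acc area => acc ++ [pvTrans area]) []) pvKey = _
    rw [PySem.List.foldl_append_singleton_eq_map, List.nil_append]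
    apply pv_sorted_groups pvKey _ (by decide)
    intro v hv
    rw [List.mem_map] at hv
    obtain ⟨a, ha, rfl⟩ := hv
    have hs := hpre a ha
    have hkey : pvKey (pvTrans a) = PySem.Dict.getD pvSortOrder (PySem.Str.lower a.2) 0 := by
      unfold pvKey; rw [pv_lower_trans]
    rw [hkey]
    simp only [pvCats, List.mem_cons, List.not_mem_nil, or_false] at hs
    rcases hs with h | h | h | h | h | h | h | h <;> rw [h] <;> decide
  -- B's side: values of the bucket dict, keys stay the eight categories
  have hB : sort_results_alt results =
      pvCats.flatMap (fun c =>
        (results.filter (fun a => PySem.Str.lower (pvTrans a).2 == c)).map pvTrans) := by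
    show (results.foldl (fun d area =>
        d.modify (PySem.Str.lower (pvTrans area).2) [] (fun b => b ++ [pvTrans area]))
        pvBuckets0).values.foldl (fun out b => out ++ b) [] = _
    set buckets := results.foldl (fun d area =>
      d.modify (PySem.Str.lower (pvTrans area).2) [] (fun b => b ++ [pvTrans area]))
      pvBuckets0 with hbdef
    have hkeys : buckets.keys = pvCats := by
      rw [hbdef, PySem.Dict.keys_foldl_modify_key results
        (fun area => PySem.Str.lower (pvTrans area).2) []
        (fun d area => (fun b => b ++ [pvTrans area])) pvBuckets0]
      have hb0 : pvBuckets0.keys = pvCats := by decide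
      rw [hb0]
      apply pv_set_update_of_mem
      intro x hx
      rw [List.mem_map] at hx
      obtain ⟨a, ha, rfl⟩ := hx
      rw [pv_lower_trans]
      exact hpre a ha
    have hget : ∀ c : String, buckets.getD c [] =
        (results.filter (fun a => PySem.Str.lower (pvTrans a).2 == c)).map pvTrans := by
      intro c
      have hmap : buckets = (results.map (fun a =>
          (PySem.Str.lower (pvTrans a).2, pvTrans a))).foldl
          (fun d p => d.modify p.1 [] (fun b => b ++ [p.2])) pvBuckets0 := by
        rw [hbdef, List.foldl_map]
      rw [hmap, PySem.Dict.getD_foldl_modify_append, pv_b0_getD, List.nil_append,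
        List.filter_map]
      rw [List.map_map]
      congr 1
    rw [PySem.List.foldl_append_eq_flatten, List.nil_append,
      PySem.Dict.values_eq_map_keys buckets (by rw [hkeys]; decide) [], hkeys]
    rw [← List.flatMap_def]  -- flatten ∘ map = flatMap
    apply List.flatMap_congr
    intro c hc
    exact hget c
  rw [hA, hB]
  simp only [pvCats, List.flatMap_cons, List.flatMap_nil, List.append_nil]
  rw [pv_component results hpre "area" 0 (by decide),
    pv_component results hpre "outcode" 1 (by decide),
    pv_component results hpre "sector" 2 (by decide),
    pv_component results hpre "postcode" 3 (by decide),
    pv_component results hpre "town" 4 (by decide),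
    pv_component results hpre "county" 5 (by decide),
    pv_component results hpre "district" 6 (by decide),
    pv_component results hpre "street" 7 (by decide)]
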